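-- pv_equiv track=rewrite | github.com/VicidominiLab/BrightEyes-FFS | src/brighteyes_ffs/fcs/atimes2corrparallel.py | convert_crossall_to_list_of_g
-- ===== SOURCE A (Python) =====
-- def convert_crossall_to_list_of_g(n_ch, start_ch=0):
--     """
--     Convert the string "crossAll" to a list of all crosscorrelations to calculate
--
--     Parameters
--     ----------
--     n_ch : int
--         Number of channels.
--
--     Returns
--     -------
--     list_of_g : list of strings
--         ["x0000", "x0001", ..., "x2525"].
--
--     """
--     list_of_g = []
--     for i in range(n_ch):
--         if i < start_ch:
--             continue
--         str_i = ""
--         if i < 10: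
--             str_i += "0"
--         str_i += str(i)
--         for j in range(n_ch):
--             if j < start_ch:
--                 continue
--             str_j = ""
--             if j < 10:
--                 str_j += "0"
--             str_j += str(j)
--             list_of_g.append("x" + str_i + str_j)
--     return list_of_g
-- ===== SOURCE B (Python) =====
-- def convert_crossall_to_list_of_g(n_ch, start_ch=0):
--     lo = max(start_ch, 0)
--     m = n_ch - lo
--     if m <= 0:
--         return []
--     return ["x%02d%02d" % (lo + k // m, lo + k % m) for k in range(m * m)]
-- ===== Notes on version B (the rewrite author's own statement) =====
-- stated objective: alternative
-- what changed: B replaces A's guarded nested loops by a single flat pass over range(m*m) that recovers the channel pair of index k by divmod arithmetic (lo + k//m, lo + k%m) and formats it once with one %02d%02d format string.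
import Mathlib
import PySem

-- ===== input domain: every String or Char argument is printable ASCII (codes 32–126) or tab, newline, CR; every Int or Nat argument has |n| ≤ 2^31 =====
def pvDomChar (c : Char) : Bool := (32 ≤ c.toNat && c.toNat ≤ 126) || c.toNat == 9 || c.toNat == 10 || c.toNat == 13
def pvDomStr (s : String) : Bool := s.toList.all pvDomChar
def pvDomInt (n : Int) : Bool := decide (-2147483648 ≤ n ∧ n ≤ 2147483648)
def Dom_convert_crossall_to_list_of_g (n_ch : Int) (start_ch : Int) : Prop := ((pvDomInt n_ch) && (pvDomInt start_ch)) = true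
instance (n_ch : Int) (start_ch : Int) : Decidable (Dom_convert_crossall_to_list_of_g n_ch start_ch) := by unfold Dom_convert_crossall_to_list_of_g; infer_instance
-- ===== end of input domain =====

-- B replaces A's guarded nested loops by one flat pass over range(m*m), recovering each
-- channel pair by divmod index arithmetic and formatting it with a single "%02d%02d".

-- ===== PORT A =====
def convert_crossall_to_list_of_g (n_ch : Int) (start_ch : Int) : List String :=
  (PySem.List.pyRange 0 n_ch 1).foldl (fun list_of_g i =>
    if i < start_ch then list_of_g
    else
      let str_i := (if i < 10 then "0" else "") ++ PySem.Int.toStr i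
      (PySem.List.pyRange 0 n_ch 1).foldl (fun acc j =>
        if j < start_ch then acc
        else
          let str_j := (if j < 10 then "0" else "") ++ PySem.Int.toStr j
          acc ++ ["x" ++ str_i ++ str_j]) list_of_g) []

-- ===== PORT B =====
-- "%02d" % i, exact for 0 ≤ i (the only values it is applied to here)
def pvFmt02 (i : Int) : String := (if i < 10 then "0" else "") ++ PySem.Int.toStr i

def convert_crossall_to_list_of_g_alt (n_ch : Int) (start_ch : Int) : List String :=
  let lo := max start_ch 0
  let m := n_ch - lo
  if m ≤ 0 then []
  else (PySem.List.pyRange 0 (m * m) 1).map (fun k =>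
    "x" ++ pvFmt02 (lo + PySem.Int.floordiv k m) ++ pvFmt02 (lo + PySem.Int.mod k m))

-- ===== PRECONDITION & SPEC =====
def Spec_convert_crossall_to_list_of_g (n_ch : Int) (start_ch : Int) (out : List String) : Prop := out = convert_crossall_to_list_of_g_alt n_ch start_ch
instance (n_ch : Int) (start_ch : Int) (out : List String) : Decidable (Spec_convert_crossall_to_list_of_g n_ch start_ch out) := by unfold Spec_convert_crossall_to_list_of_g; infer_instance

-- ===== CLAIM (what is proved, stated in full; the proofs are below) =====
def Claim_equal_convert_crossall_to_list_of_g : Prop := ∀ (n_ch : Int) (start_ch : Int), Dom_convert_crossall_to_list_of_g n_ch start_ch → Spec_convert_crossall_to_list_of_g n_ch start_ch (convert_crossall_to_list_of_g n_ch start_ch)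

-- ===== LEMMAS AND PROOFS =====

-- a 'continue'-guarded append loop is a flatMap over the filtered list
theorem pv_foldl_skip {α β : Type} (P : α → Prop) [DecidablePred P] (g : α → List β) :
    ∀ (l : List α) (acc : List β),
      l.foldl (fun acc x => if P x then acc else acc ++ g x) acc
        = acc ++ (l.filter (fun x => decide (¬ P x))).flatMap g := by
  intro l
  induction l with
  | nil => simp
  | cons x xs ih =>
    intro acc
    by_cases h : P x <;> simp [h, ih]

-- filtering 'start_ch ≤ i' out of range(n_ch) is range(max(start_ch,0), n_ch)
theorem pv_filter_range (n s : Int) :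
    (PySem.List.pyRange 0 n 1).filter (fun i => decide (¬ i < s))
      = PySem.List.pyRange (max s 0) n 1 := by
  by_cases hs : s ≤ 0
  · rw [max_eq_right hs]
    apply List.filter_eq_self.mpr
    intro a ha
    have h := (PySem.List.mem_pyRange_one).mp ha
    simp
    omega
  · rw [not_le] at hs
    by_cases hn : n ≤ s
    · rw [max_eq_left (le_of_lt hs), PySem.List.pyRange_one_eq_nil hn]
      apply List.filter_eq_nil_iff.mpr
      intro a ha
      have h := (PySem.List.mem_pyRange_one).mp ha
      simp
      omega
    · rw [PySem.List.pyRange_one_append 0 s n (le_of_lt hs) (le_of_lt (not_le.mp hn)),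
        List.filter_append, max_eq_left (le_of_lt hs)]
      have h1 : (PySem.List.pyRange 0 s 1).filter (fun i => decide (¬ i < s)) = [] := by
        apply List.filter_eq_nil_iff.mpr
        intro a ha
        have h := (PySem.List.mem_pyRange_one).mp ha
        simp
        omega
      have h2 : (PySem.List.pyRange s n 1).filter (fun i => decide (¬ i < s))
          = PySem.List.pyRange s n 1 := by
        apply List.filter_eq_self.mpr
        intro a ha
        have h := (PySem.List.mem_pyRange_one).mp ha
        simp
        omega
      rw [h1, h2, List.nil_append]

-- A's double loop evaluates to a flatMap over the surviving index range
theorem pv_A_flatMap (n s : Int) :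
    convert_crossall_to_list_of_g n s
      = (PySem.List.pyRange (max s 0) n 1).flatMap
          (fun i => (PySem.List.pyRange (max s 0) n 1).map
            (fun j => "x" ++ pvFmt02 i ++ pvFmt02 j)) := by
  unfold convert_crossall_to_list_of_g
  have hinner : ∀ (i : Int) (acc : List String),
      (PySem.List.pyRange 0 n 1).foldl (fun acc j =>
        if j < s then acc
        else acc ++ ["x" ++ ((if i < 10 then "0" else "") ++ PySem.Int.toStr i)
                        ++ ((if j < 10 then "0" else "") ++ PySem.Int.toStr j)]) acc
        = acc ++ (PySem.List.pyRange (max s 0) n 1).map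
            (fun j => "x" ++ pvFmt02 i ++ pvFmt02 j) := by
    intro i acc
    rw [pv_foldl_skip (fun j => j < s)
      (fun j => ["x" ++ ((if i < 10 then "0" else "") ++ PySem.Int.toStr i)
                    ++ ((if j < 10 then "0" else "") ++ PySem.Int.toStr j)]),
      pv_filter_range]
    rw [← List.map_eq_flatMap]
    simp [pvFmt02]
  calc (PySem.List.pyRange 0 n 1).foldl (fun list_of_g i =>
        if i < s then list_of_g
        else
          (PySem.List.pyRange 0 n 1).foldl (fun acc j =>
            if j < s then acc
            else acc ++ ["x" ++ ((if i < 10 then "0" else "") ++ PySem.Int.toStr i)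
                            ++ ((if j < 10 then "0" else "") ++ PySem.Int.toStr j)]) list_of_g) []
      = (PySem.List.pyRange 0 n 1).foldl (fun list_of_g i =>
          if i < s then list_of_g
          else list_of_g ++ (PySem.List.pyRange (max s 0) n 1).map
              (fun j => "x" ++ pvFmt02 i ++ pvFmt02 j)) [] := by
        apply PySem.List.foldl_congr_mem
        intro acc i _
        by_cases h : i < s
        · simp [h]
        · simp [h, hinner i acc]
    _ = (PySem.List.pyRange (max s 0) n 1).flatMap
          (fun i => (PySem.List.pyRange (max s 0) n 1).map
            (fun j => "x" ++ pvFmt02 i ++ pvFmt02 j)) := by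
        rw [pv_foldl_skip (fun i => i < s)
          (fun i => (PySem.List.pyRange (max s 0) n 1).map
            (fun j => "x" ++ pvFmt02 i ++ pvFmt02 j)), pv_filter_range, List.nil_append]

-- flattening range(m*m) into blocks of m: the k-th element is the pair (k//m, k%m)
theorem pv_range_sq {β : Type} (m : Int) (hm : 0 < m) (f : Int → β) :
    (PySem.List.pyRange 0 (m * m) 1).map f
      = (PySem.List.pyRange 0 m 1).flatMap
          (fun i => (PySem.List.pyRange 0 m 1).map (fun j => f (i * m + j))) := by
  have key : ∀ (a : Nat),
      (PySem.List.pyRange 0 ((a : Int) * m) 1).map f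
        = (PySem.List.pyRange 0 (a : Int) 1).flatMap
            (fun i => (PySem.List.pyRange 0 m 1).map (fun j => f (i * m + j))) := by
    intro a
    induction a with
    | zero => simp [PySem.List.pyRange_one_eq_nil]
    | succ a ih =>
      have h1 : ((a + 1 : Nat) : Int) * m = (a : Int) * m + m := by push_cast; ring
      have h2 : (0 : Int) ≤ (a : Int) * m := by positivity
      have h3 : (PySem.List.pyRange 0 ((a : Int) * m + m) 1)
          = PySem.List.pyRange 0 ((a : Int) * m) 1
            ++ PySem.List.pyRange ((a : Int) * m) ((a : Int) * m + m) 1 :=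
        PySem.List.pyRange_one_append 0 ((a : Int) * m) ((a : Int) * m + m) h2 (by omega)
      have h4 : ((a + 1 : Nat) : Int) = (a : Int) + 1 := by push_cast; ring
      have h5 : PySem.List.pyRange 0 ((a : Int) + 1) 1
          = PySem.List.pyRange 0 (a : Int) 1 ++ [(a : Int)] :=
        PySem.List.pyRange_one_succ_right (by positivity)
      have h6 : PySem.List.pyRange ((a : Int) * m) ((a : Int) * m + m) 1
          = (PySem.List.pyRange 0 m 1).map (fun j => (a : Int) * m + j) := by
        rw [PySem.List.pyRange_one ((a : Int) * m) ((a : Int) * m + m),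
          PySem.List.pyRange_one 0 m]
        simp [List.map_map, Function.comp_def]
      rw [h1, h3, List.map_append, ih, h4, h5, h6, List.flatMap_append, List.map_map]
      simp [Function.comp_def]
  have hm' : m = ((m.toNat : Nat) : Int) := by omega
  calc (PySem.List.pyRange 0 (m * m) 1).map f
      = (PySem.List.pyRange 0 ((m.toNat : Int) * m) 1).map f := by rw [← hm']
    _ = (PySem.List.pyRange 0 (m.toNat : Int) 1).flatMap
          (fun i => (PySem.List.pyRange 0 m 1).map (fun j => f (i * m + j))) := key m.toNat
    _ = (PySem.List.pyRange 0 m 1).flatMap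
          (fun i => (PySem.List.pyRange 0 m 1).map (fun j => f (i * m + j))) := by rw [← hm']

-- divmod recovers the pair encoded as i*m + j
theorem pv_floordiv_block (m i j : Int) (hm : 0 < m) (hj0 : 0 ≤ j) (hjm : j < m) :
    PySem.Int.floordiv (i * m + j) m = i ∧ PySem.Int.mod (i * m + j) m = j := by
  have hd : PySem.Int.floordiv (i * m + j) m = i := by
    rw [PySem.Int.floordiv_eq_iff_of_pos hm]
    constructor
    · omega
    · have : (i + 1) * m = i * m + m := by ring
      omega
  refine ⟨hd, ?_⟩
  have := PySem.Int.floordiv_mul_add_mod (i * m + j) m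
  rw [hd] at this
  omega

-- ===== VERDICT (by name: the statement is the Claim_ definition above) =====
theorem convert_crossall_to_list_of_g_spec : Claim_equal_convert_crossall_to_list_of_g := by
  intro n s _
  unfold Spec_convert_crossall_to_list_of_g convert_crossall_to_list_of_g_alt
  rw [pv_A_flatMap]
  set lo := max s 0 with hlo
  by_cases hm : n - lo ≤ 0
  · simp only [hm, if_true]
    rw [PySem.List.pyRange_one_eq_nil (by omega : n ≤ lo)]
    simp
  · rw [not_le] at hm
    simp only [if_neg (not_le.mpr hm)]
    rw [pv_range_sq (n - lo) hm]
    have hreidx : PySem.List.pyRange lo n 1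
        = (PySem.List.pyRange 0 (n - lo) 1).map (fun k => lo + k) := by
      rw [PySem.List.pyRange_one lo n, PySem.List.pyRange_one 0 (n - lo)]
      simp [List.map_map, Function.comp_def]
    rw [hreidx, List.flatMap_map]
    apply List.flatMap_congr
    intro i hi
    rw [List.map_map]
    apply List.map_congr_left
    intro j hj
    have hib := (PySem.List.mem_pyRange_one).mp hi
    have hjb := (PySem.List.mem_pyRange_one).mp hj
    obtain ⟨hd, hmod⟩ := pv_floordiv_block (n - lo) i j hm hjb.1 hjb.2
    simp [hd, hmod]
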